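-- pv_equiv track=rewrite | github.com/marknarain/root-calculator-python | calc.py | cnv
-- ===== SOURCE A (Python) =====
-- def cnv(x):
--     positiveX = x
--     if x < 0:
--         positiveX = positiveX * (-1)
--
--     output = [int(i) for i in str(positiveX)]
--     if x >= 0:
--         output.insert(0,1)
--     else:
--         output.insert(0,-1)
--
--     return(output)
-- ===== SOURCE B (Python) =====
-- def cnv(x):
--     sign = 1 if x >= 0 else -1
--     m = -x if x < 0 else x
--     if m == 0:
--         return [sign, 0]
--     digits = []
--     while m > 0:
--         digits.append(m % 10)
--         m //= 10
--     digits.reverse()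
--     return [sign] + digits
-- ===== Notes on version B (the rewrite author's own statement) =====
-- stated objective: alternative
-- what changed: B extracts digits arithmetically (repeated % 10 and // 10, then reverse) with the sign computed up front, instead of A's round-trip through str() with per-character int() parsing and a front insert.
import Mathlib
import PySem

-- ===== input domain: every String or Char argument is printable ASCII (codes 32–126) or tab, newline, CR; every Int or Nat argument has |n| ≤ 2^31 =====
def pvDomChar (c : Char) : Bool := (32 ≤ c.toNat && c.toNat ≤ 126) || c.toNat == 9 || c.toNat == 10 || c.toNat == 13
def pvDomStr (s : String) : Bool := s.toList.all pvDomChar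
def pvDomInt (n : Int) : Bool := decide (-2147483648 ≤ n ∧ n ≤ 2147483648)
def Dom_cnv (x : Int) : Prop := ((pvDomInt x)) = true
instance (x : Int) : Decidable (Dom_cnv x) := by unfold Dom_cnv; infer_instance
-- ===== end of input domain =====

-- B replaces A's str()-round-trip digit parsing by arithmetic digit extraction (% 10 / // 10 with reverse); alternative decomposition, same cost.


-- ===== PORT A =====
def cnv (x : Int) : List Int :=
  let positiveX := if x < 0 then x * (-1) else x
  -- [int(i) for i in str(positiveX)]: int(i) on the single characters of str(positiveX)
  -- is ported by hand as c.toNat - 48, exact for the decimal digit characters str()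
  -- produces for the nonnegative positiveX
  let output := (PySem.Int.toChars positiveX).map (fun c => (c.toNat : Int) - 48)
  if 0 ≤ x then PySem.List.insert output 0 1 else PySem.List.insert output 0 (-1)

-- ===== PORT B =====
-- the while loop of Source B: collect m % 10, then continue with m // 10
def cnvDigitsRev (m : Nat) : List Int :=
  if _h : m = 0 then [] else ((m % 10 : Nat) : Int) :: cnvDigitsRev (m / 10)
decreasing_by exact Nat.div_lt_self (Nat.pos_of_ne_zero _h) (by omega)

def cnv_alt (x : Int) : List Int :=
  let sign : Int := if 0 ≤ x then 1 else -1
  let m : Nat := x.natAbs          -- -x if x < 0 else x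
  if m = 0 then [sign, 0] else sign :: (cnvDigitsRev m).reverse

-- ===== PRECONDITION & SPEC =====
def Spec_cnv (x : Int) (out : List Int) : Prop := out = cnv_alt x
instance (x : Int) (out : List Int) : Decidable (Spec_cnv x out) := by unfold Spec_cnv; infer_instance

-- ===== CLAIM (what is proved, stated in full; the proofs are below) =====
def Claim_equal_cnv : Prop := ∀ (x : Int), Dom_cnv x → Spec_cnv x (cnv x)

-- ===== LEMMAS AND PROOFS =====

-- high-order-first digit characters: what Nat.toDigits 10 computes
def hdChars (n : Nat) : List Char :=
  if _h : n < 10 then [Nat.digitChar n]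
  else hdChars (n / 10) ++ [Nat.digitChar (n % 10)]
decreasing_by exact Nat.div_lt_self (by omega) (by omega)

lemma toDigitsCore_eq_hdChars (fuel n : Nat) (ds : List Char) (h : n < fuel) :
    Nat.toDigitsCore 10 fuel n ds = hdChars n ++ ds := by
  induction fuel generalizing n ds with
  | zero => omega
  | succ f ih =>
    rw [Nat.toDigitsCore]
    by_cases h10 : n / 10 = 0
    · have hn : n < 10 := by omega
      simp [h10, hdChars, hn, Nat.mod_eq_of_lt hn]
    · have hn : ¬ n < 10 := by omega
      have : n / 10 < f := by
        have := Nat.div_lt_self (by omega : 0 < n) (by omega : 1 < 10)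
        omega
      simp only [h10, ih (n / 10) _ this]
      conv_rhs => rw [hdChars]
      simp [hn]

lemma toDigits_eq_hdChars (n : Nat) : Nat.toDigits 10 n = hdChars n := by
  have := toDigitsCore_eq_hdChars (n + 1) n [] (by omega)
  simpa [Nat.toDigits] using this

lemma digitChar_val (d : Nat) (h : d < 10) :
    ((Nat.digitChar d).toNat : Int) - 48 = (d : Int) := by
  interval_cases d <;> rfl

lemma map_hdChars (m : Nat) (hm : m ≠ 0) :
    (hdChars m).map (fun c => (c.toNat : Int) - 48) = (cnvDigitsRev m).reverse := by
  induction m using Nat.strong_induction_on with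
  | _ m ih =>
    rw [hdChars, cnvDigitsRev]
    by_cases h10 : m < 10
    · simp only [dif_pos h10, List.map_cons, List.map_nil,
        digitChar_val m h10]
      have : m / 10 = 0 := Nat.div_eq_of_lt h10
      rw [this, cnvDigitsRev]
      simp [hm, Nat.mod_eq_of_lt h10]
    · have hq : m / 10 ≠ 0 := by
        intro h; have := Nat.lt_of_div_eq_zero (by omega) h; omega
      have hlt : m / 10 < m := Nat.div_lt_self (by omega) (by omega)
      simp only [dif_neg h10, List.map_append, List.map_cons, List.map_nil,
        ih (m / 10) hlt hq, digitChar_val (m % 10) (Nat.mod_lt _ (by omega))]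
      simp [hm]

lemma map_toChars (m : Nat) :
    (PySem.Int.toChars (m : Int)).map (fun c => (c.toNat : Int) - 48)
      = if m = 0 then [0] else (cnvDigitsRev m).reverse := by
  have hnn : ¬ ((m : Int) < 0) := by omega
  by_cases hm : m = 0
  · subst hm; decide
  · rw [if_neg hm, ← map_hdChars m hm, ← toDigits_eq_hdChars]
    simp [PySem.Int.toChars, hnn]

-- ===== VERDICT (by name: the statement is the Claim_ definition above) =====
theorem cnv_spec : Claim_equal_cnv := by
  intro x _
  unfold Spec_cnv cnv cnv_alt
  by_cases hx : x < 0
  · have h1 : ¬ (0 ≤ x) := by omega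
    have h2 : x * (-1) = ((x.natAbs : Nat) : Int) := by omega
    have h3 : x.natAbs ≠ 0 := by omega
    simp only [if_pos hx, if_neg h1, h2, map_toChars, if_neg h3, PySem.List.insert]
    simp [PySem.List.sliceIndices]
  · have h1 : 0 ≤ x := by omega
    lift x to ℕ using h1 with m
    simp only [if_neg hx, Int.natCast_nonneg, if_pos,
      map_toChars, Int.natAbs_natCast, PySem.List.insert]
    by_cases h3 : m = 0 <;>
      simp [h3, PySem.List.sliceIndices]
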